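-- pv_equiv track=rewrite | github.com/rlaneyjr/lib | clitools/__init__.py | split_function_doc
-- ===== SOURCE A (Python) =====
-- def split_function_doc(doc):
--     """
--     Performs a very simple splitting of a function documentation:
--     - separate blocks starting with :name from the rest of the
--       function documentation
--
--     Note: this function expects the passed-in docstring
--           to be already cleaned, usually via pydoc.getdoc().
--
--     :yields: two-tuples (block_info, block_data).
--         - block info is a tuple of strings describing the workds
--           between the first two colons, or None
--         - block data is the block data without any prefix
--     """
--
--     def tokenize_blocks(lines):
--         ## We need to loop until we find a line starting with :
--         ## or the end of the docstring.
--         buf = []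
--         for line in lines:
--             if line.startswith(':'):
--                 if len(buf):
--                     yield buf
--                     buf = []
--             buf.append(line)
--         if len(buf):
--             yield buf
--
--     for block in tokenize_blocks(doc.splitlines()):
--         block_data = '\n'.join(block).strip()
--         if block_data.startswith(':'):
--             _, args, block_data = block_data.split(':', 2)
--             block_info = tuple(args.split())
--
--         else:
--             block_info = None
--         yield block_info, block_data.strip()
-- ===== SOURCE B (Python) =====
-- def split_function_doc(doc):
--     lines = doc.splitlines()
--     bounds = [i for i, line in enumerate(lines) if line.startswith(':')]
--     cuts = ([0] + bounds) if lines and (not bounds or bounds[0] > 0) else bounds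
--     for a, b in zip(cuts, cuts[1:] + [len(lines)]):
--         data = '\n'.join(lines[a:b]).strip()
--         if data.startswith(':'):
--             _, args, data = data.split(':', 2)
--             yield tuple(args.split()), data.strip()
--         else:
--             yield None, data.strip()
-- ===== Notes on version B (the rewrite author's own statement) =====
-- stated objective: alternative
-- what changed: A's streaming buffer generator (tokenize_blocks with a mutable buf flushed at each ':'-line) is replaced by a two-phase index-table decomposition: collect the indices of lines starting with ':', turn them into cut points, and slice the line list into blocks; the per-block parsing is unchanged.
-- outside the precondition, e.g. on split_function_doc(':'): A raises ValueError, B raises ValueError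
import Mathlib
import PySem

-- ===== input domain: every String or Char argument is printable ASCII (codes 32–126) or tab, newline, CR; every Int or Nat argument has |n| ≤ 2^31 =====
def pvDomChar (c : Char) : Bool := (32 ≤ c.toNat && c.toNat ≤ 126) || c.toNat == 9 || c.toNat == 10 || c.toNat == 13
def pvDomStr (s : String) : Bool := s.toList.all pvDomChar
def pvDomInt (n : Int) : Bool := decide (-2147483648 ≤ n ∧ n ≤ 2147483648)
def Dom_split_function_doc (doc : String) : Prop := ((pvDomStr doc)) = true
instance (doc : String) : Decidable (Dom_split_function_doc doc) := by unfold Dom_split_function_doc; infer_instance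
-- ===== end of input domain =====

-- B replaces A's streaming buffer generator by a boundary-index table and slice partition of the
-- line list (objective: alternative decomposition, same cost); the per-block parsing is unchanged.

-- ===== PORT A =====
-- the body of A's inner generator loop: fold state = (finished blocks, current buffer)
def pvStepA (st : List (List String) × List String) (line : String) :
    List (List String) × List String :=
  if PySem.Str.startswith line ":" then
    if st.2.length ≠ 0 then (st.1 ++ [st.2], [line]) else (st.1, st.2 ++ [line])
  else (st.1, st.2 ++ [line])

-- A's tokenize_blocks: buffer lines, flush on a line starting with ':', flush the tail buffer
def pvBlocksA (lines : List String) : List (List String) :=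
  let st := lines.foldl pvStepA ([], [])
  if st.2.length ≠ 0 then st.1 ++ [st.2] else st.1

-- A's per-block yield.  Where Python raises ValueError (fewer than 3 parts from split(':', 2),
-- i.e. a ':'-block with fewer than two colons) the port returns (none, ""); Pre_ excludes that.
def pvYieldA (block : List String) : Option (List String) × String :=
  let block_data := PySem.Str.strip (PySem.Str.join "\n" block)
  if PySem.Str.startswith block_data ":" then
    match PySem.Str.splitMax? block_data ":" 2 with
    | some [_, args, rest] => (some (PySem.Str.split₀ args), PySem.Str.strip rest)
    | _ => (none, "")
  else (none, PySem.Str.strip block_data)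

def split_function_doc (doc : String) : List (Option (List String) × String) :=
  (pvBlocksA (PySem.Str.splitlines doc)).map pvYieldA

-- ===== PORT B =====
-- B's per-block yield (Source B's loop body; same ValueError convention as pvYieldA, outside Pre_)
def pvYieldB (block : List String) : Option (List String) × String :=
  let data := PySem.Str.strip (PySem.Str.join "\n" block)
  if PySem.Str.startswith data ":" then
    match PySem.Str.splitMax? data ":" 2 with
    | some [_, args, rest] => (some (PySem.Str.split₀ args), PySem.Str.strip rest)
    | _ => (none, "")
  else (none, PySem.Str.strip data)

def split_function_doc_alt (doc : String) : List (Option (List String) × String) :=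
  let lines := PySem.Str.splitlines doc
  let bounds := ((PySem.List.enumerate lines).filter
    (fun p => PySem.Str.startswith p.2 ":")).map Prod.fst
  let cuts : List Int :=
    if !lines.isEmpty && (match bounds with | [] => true | b :: _ => decide (0 < b))
    then 0 :: bounds else bounds
  (cuts.zip (cuts.tail ++ [(lines.length : Int)])).map
    (fun ab => pvYieldB (PySem.List.slice lines (some ab.1) (some ab.2)))

-- ===== PRECONDITION & SPEC =====
-- total number of ':' characters in a block of lines
def pvColons (block : List String) : Nat := (block.map (fun l => PySem.Str.count l ":")).sum

-- Pre_ excludes exactly the docstrings on which A raises ValueError ('not enough values to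
-- unpack' from block_data.split(':', 2)): some block whose stripped data starts with ':'
-- carries fewer than two ':' characters.  B raises there too.
def Pre_split_function_doc (doc : String) : Prop :=
  (PySem.Str.startswith (PySem.Str.strip (PySem.Str.join "\n"
      ((PySem.Str.splitlines doc).takeWhile (fun l => !PySem.Str.startswith l ":")))) ":" = true →
    2 ≤ pvColons ((PySem.Str.splitlines doc).takeWhile (fun l => !PySem.Str.startswith l ":"))) ∧
  (∀ i : Nat, i < (PySem.Str.splitlines doc).length →
    PySem.Str.startswith ((PySem.Str.splitlines doc).getD i "") ":" = true →
    2 ≤ pvColons ((PySem.Str.splitlines doc).getD i "" ::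
      ((PySem.Str.splitlines doc).drop (i + 1)).takeWhile (fun l => !PySem.Str.startswith l ":")))
instance (doc : String) : Decidable (Pre_split_function_doc doc) := by
  unfold Pre_split_function_doc; infer_instance

def pvWitness_split_function_doc : String := "Adds x to y.\n\n:param x: an int\n:returns: a sum"

def Spec_split_function_doc (doc : String) (out : List (Option (List String) × String)) : Prop := out = split_function_doc_alt doc
instance (doc : String) (out : List (Option (List String) × String)) : Decidable (Spec_split_function_doc doc out) := by unfold Spec_split_function_doc; infer_instance

-- ===== CLAIM (what is proved, stated in full; the proofs are below) =====
def Claim_equal_split_function_doc : Prop := ∀ (doc : String), Dom_split_function_doc doc → Pre_split_function_doc doc → Spec_split_function_doc doc (split_function_doc doc)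

-- ===== LEMMAS AND PROOFS =====

-- a line that does NOT start a block
def pvNb (l : String) : Bool := !PySem.Str.startswith l ":"

-- reference chunking: each block is a maximal run led by a boundary line (or the preamble)
def pvChunk : List String → List (List String)
  | [] => []
  | l :: ls => (l :: ls.takeWhile pvNb) :: pvChunk (ls.dropWhile pvNb)
termination_by xs => xs.length
decreasing_by
  have := List.length_dropWhile_le pvNb ls
  simp only [List.length_cons]; omega

lemma pvFoldA (ls : List String) : ∀ (blocks : List (List String)) (buf : List String),
    buf ≠ [] →
    (let st := ls.foldl pvStepA (blocks, buf);
      if st.2.length ≠ 0 then st.1 ++ [st.2] else st.1)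
      = blocks ++ (buf ++ ls.takeWhile pvNb) :: pvChunk (ls.dropWhile pvNb) := by
  induction ls with
  | nil =>
      intro blocks buf h
      simp [pvChunk, List.length_eq_zero_iff, h]
  | cons l ls ih =>
      intro blocks buf h
      by_cases hl : PySem.Chars.startswith l.toList [':'] = true
      · have hstep : pvStepA (blocks, buf) l = (blocks ++ [buf], [l]) := by
          simp [pvStepA, hl, List.length_eq_zero_iff, h]
        simp only [List.foldl_cons, hstep]
        rw [ih (blocks ++ [buf]) [l] (by simp)]
        simp [pvNb, hl, pvChunk]
      · have hstep : pvStepA (blocks, buf) l = (blocks, buf ++ [l]) := by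
          simp [pvStepA, hl]
        simp only [List.foldl_cons, hstep]
        rw [ih blocks (buf ++ [l]) (by simp)]
        simp [pvNb, hl]

lemma pvBlocksA_eq_chunk (lines : List String) : pvBlocksA lines = pvChunk lines := by
  cases lines with
  | nil => simp [pvBlocksA, pvChunk]
  | cons l ls =>
      have hstep : pvStepA ([], []) l = ([], [l]) := by
        simp [pvStepA]
      show (let st := (l :: ls).foldl pvStepA ([], []);
        if st.2.length ≠ 0 then st.1 ++ [st.2] else st.1) = _
      simp only [List.foldl_cons, hstep]
      rw [pvFoldA ls [] [l] (by simp)]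
      simp [pvChunk]

-- B-side: the boundary-index list
def pvBnds (xs : List String) (s : Int) : List Int :=
  ((PySem.List.enumerate xs s).filter (fun p => PySem.Str.startswith p.2 ":")).map Prod.fst

def pvSegs (lines : List String) : List (List String) :=
  let bounds := pvBnds lines 0
  let cuts : List Int :=
    if !lines.isEmpty && (match bounds with | [] => true | b :: _ => decide (0 < b))
    then 0 :: bounds else bounds
  (cuts.zip (cuts.tail ++ [(lines.length : Int)])).map
    (fun ab => PySem.List.slice lines (some ab.1) (some ab.2))

lemma pvBnds_nil (s : Int) : pvBnds [] s = [] := by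
  simp [pvBnds, PySem.List.enumerate_nil]

lemma pvBnds_cons (l : String) (ls : List String) (s : Int) :
    pvBnds (l :: ls) s
      = (if PySem.Chars.startswith l.toList [':'] then [s] else []) ++ pvBnds ls (s + 1) := by
  by_cases hl : PySem.Chars.startswith l.toList [':'] = true <;>
    simp [pvBnds, PySem.List.enumerate_cons, hl]

lemma pvBnds_shift (xs : List String) : ∀ s t : Int,
    pvBnds xs (s + t) = (pvBnds xs t).map (· + s) := by
  induction xs with
  | nil => intro s t; simp [pvBnds_nil]
  | cons l ls ih =>
      intro s t
      rw [pvBnds_cons, pvBnds_cons]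
      have h1 : s + t + 1 = s + (t + 1) := by ring
      rw [h1, ih s (t + 1)]
      by_cases hl : PySem.Chars.startswith l.toList [':'] = true <;>
        simp [hl, add_comm]

lemma pvBnds_nonneg (xs : List String) : ∀ (s x : Int), x ∈ pvBnds xs s → s ≤ x := by
  induction xs with
  | nil => intro s x hx; simp [pvBnds_nil] at hx
  | cons l ls ih =>
      intro s x hx
      rw [pvBnds_cons] at hx
      rcases List.mem_append.1 hx with h | h
      · by_cases hl : PySem.Chars.startswith l.toList [':'] = true <;> simp [hl] at h
        omega
      · have := ih (s + 1) x h; omega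

lemma pvBnds_append_nb (xs : List String) : ∀ (ys : List String) (s : Int),
    (∀ l ∈ xs, pvNb l = true) →
    pvBnds (xs ++ ys) s = pvBnds ys (s + xs.length) := by
  induction xs with
  | nil => intro ys s _; simp
  | cons l ls ih =>
      intro ys s h
      have hl : PySem.Chars.startswith l.toList [':'] = false := by
        have := h l (by simp)
        simpa [pvNb] using this
      rw [List.cons_append, pvBnds_cons, hl]
      simp only [Bool.false_eq_true, if_false, List.nil_append]
      rw [ih ys (s + 1) (fun x hx => h x (by simp [hx]))]
      congr 1
      simp only [List.length_cons]
      push_cast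
      ring

-- the first line kept by dropWhile falsifies the predicate
lemma pvDropWhileHead {α : Type} (p : α → Bool) (ls : List α) (x : α) (d' : List α)
    (h : ls.dropWhile p = x :: d') : p x = false := by
  have hne : ls.dropWhile p ≠ [] := by rw [h]; simp
  have hh := List.head_dropWhile_not p hne
  rwa [show (ls.dropWhile p).head hne = x by simp [h]] at hh

lemma pvSegs_eq_chunk (lines : List String) : pvSegs lines = pvChunk lines := by
  induction lines using pvChunk.induct with
  | case1 => simp [pvSegs, pvBnds_nil, pvChunk]
  | case2 l ls ih =>
      set t := ls.takeWhile pvNb with ht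
      set d := ls.dropWhile pvNb with hd
      have htd : t ++ d = ls := List.takeWhile_append_dropWhile
      have ht_take : t = ls.take t.length :=
        List.prefix_iff_eq_take.1 (List.takeWhile_prefix pvNb)
      have hd_drop : d = ls.drop t.length := by
        conv_rhs => rw [← htd]
        rw [List.drop_left]
      have hlen : ls.length = t.length + d.length := by
        rw [← htd, List.length_append]
      have hdhead : ∀ x d', d = x :: d' → PySem.Chars.startswith x.toList [':'] = true := by
        intro x d' hxd
        have hp : pvNb x = false := pvDropWhileHead pvNb ls x d' (by rw [← hd]; exact hxd)
        simpa [pvNb] using hp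
      -- the boundary list of l :: ls
      have hb1 : pvBnds ls 1 = (pvBnds d 0).map (· + ((t.length : Int) + 1)) := by
        rw [← htd, pvBnds_append_nb t d 1 (fun x hx => List.mem_takeWhile_imp hx)]
        rw [show (1 : Int) + t.length = ((t.length : Int) + 1) + 0 by ring,
          pvBnds_shift d ((t.length : Int) + 1) 0]
      have hbnds : pvBnds (l :: ls) 0
          = (if PySem.Chars.startswith l.toList [':'] then [(0 : Int)] else [])
            ++ (pvBnds d 0).map (· + ((t.length : Int) + 1)) := by
        rw [pvBnds_cons, show (0 : Int) + 1 = 1 by ring, hb1]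
      -- cuts of l :: ls collapse to 0 :: shifted boundary list of d
      have hcuts :
          (if !(l :: ls).isEmpty && (match pvBnds (l :: ls) 0 with
              | [] => true | b :: _ => decide (0 < b))
            then 0 :: pvBnds (l :: ls) 0 else pvBnds (l :: ls) 0)
          = 0 :: (pvBnds d 0).map (· + ((t.length : Int) + 1)) := by
        by_cases hl : PySem.Chars.startswith l.toList [':'] = true
        · rw [hbnds]; simp [hl]
        · rw [hbnds]
          simp only [hl, Bool.false_eq_true, if_false, List.nil_append]
          cases hc : pvBnds d 0 with
          | nil => simp
          | cons c c0 =>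
              have hc0 : 0 ≤ c := pvBnds_nonneg d 0 c (by rw [hc]; simp)
              have hgt : (0 : Int) < c + ((t.length : Int) + 1) := by omega
              simp [hgt]
      -- now compute
      show (let bounds := pvBnds (l :: ls) 0;
        let cuts : List Int :=
          if !(l :: ls).isEmpty && (match bounds with | [] => true | b :: _ => decide (0 < b))
          then 0 :: bounds else bounds;
        (cuts.zip (cuts.tail ++ [((l :: ls).length : Int)])).map
          (fun ab => PySem.List.slice (l :: ls) (some ab.1) (some ab.2))) = _
      simp only [hcuts]
      cases hc : pvBnds d 0 with
      | nil =>
          -- no boundary inside d, hence d = [] and the whole doc is one block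
          have hdnil : d = [] := by
            cases hdc : d with
            | nil => rfl
            | cons x d' =>
                rw [hdc, pvBnds_cons, hdhead x d' hdc] at hc
                simp at hc
          have htls : t = ls := by rw [← htd, hdnil, List.append_nil]
          have hslice : PySem.List.slice (l :: ls) none (some ((ls.length : Int) + 1))
              = l :: ls := by
            rw [PySem.List.slice_to _ (by omega)]
            rw [show ((ls.length : Int) + 1).toNat = ls.length + 1 by omega]
            simp
          simp [pvChunk, ← ht, ← hd, htls, hdnil, hslice]
      | cons c c0 =>
          have hdne : d ≠ [] := by
            intro hdnil; rw [hdnil, pvBnds_nil] at hc; simp at hc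
          obtain ⟨x, d', hxd⟩ := List.exists_cons_of_ne_nil hdne
          have hc0 : c = 0 := by
            rw [hxd, pvBnds_cons, hdhead x d' hxd] at hc
            simp at hc
            omega
          subst hc0
          -- first block: l :: t
          have hfirst : PySem.List.slice (l :: ls) (some (0 : Int))
              (some ((0 : Int) + ((t.length : Int) + 1))) = l :: t := by
            rw [PySem.List.slice_toNat (l :: ls) (by omega) (by omega)]
            rw [show ((0 : Int) + ((t.length : Int) + 1)).toNat = t.length + 1 by omega]
            simp only [Int.toNat_zero, Nat.sub_zero, List.drop_zero, List.take_succ_cons]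
            rw [← ht_take]
          have hn : ((l :: ls).length : Int)
              = (d.length : Int) + ((t.length : Int) + 1) := by
            simp only [List.length_cons]
            push_cast [hlen]
            ring
          -- shifted slices of l :: ls are slices of d
          have hrest : ∀ a b : Int, 0 ≤ a → 0 ≤ b →
              PySem.List.slice (l :: ls) (some (a + ((t.length : Int) + 1)))
                (some (b + ((t.length : Int) + 1)))
              = PySem.List.slice d (some a) (some b) := by
            intro a b ha hb
            rw [PySem.List.slice_toNat (l :: ls) (by omega) (by omega),
              PySem.List.slice_toNat d ha hb]
            rw [show (b + ((t.length : Int) + 1)).toNat - (a + ((t.length : Int) + 1)).toNat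
                = b.toNat - a.toNat by omega]
            rw [show (a + ((t.length : Int) + 1)).toNat = (t.length + 1) + a.toNat by omega]
            rw [← List.drop_drop]
            congr 1
            simp only [List.drop_succ_cons]
            rw [← hd_drop]
          -- the segments of d, as the tail of the zip
          have hsegsd : pvSegs d = ((((0 : Int)) :: c0).zip (c0 ++ [(d.length : Int)])).map
              (fun ab => PySem.List.slice d (some ab.1) (some ab.2)) := by
            simp [pvSegs, hc]
          have htail : List.map (fun ab => PySem.List.slice (l :: ls) (some ab.1) (some ab.2))
              ((((0 : Int) + ((t.length : Int) + 1)) ::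
                  List.map (fun x => x + ((t.length : Int) + 1)) c0).zip
                (List.map (fun x => x + ((t.length : Int) + 1)) c0
                  ++ [(d.length : Int) + ((t.length : Int) + 1)]))
              = List.map (fun ab => PySem.List.slice d (some ab.1) (some ab.2))
                (((0 : Int) :: c0).zip (c0 ++ [(d.length : Int)])) := by
            rw [show ((0 : Int) + ((t.length : Int) + 1)) :: List.map
                  (fun x => x + ((t.length : Int) + 1)) c0
                = List.map (fun x => x + ((t.length : Int) + 1)) ((0 : Int) :: c0) from rfl]
            rw [show (List.map (fun x => x + ((t.length : Int) + 1)) c0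
                  ++ [(d.length : Int) + ((t.length : Int) + 1)])
                = List.map (fun x => x + ((t.length : Int) + 1)) (c0 ++ [(d.length : Int)]) by
              rw [List.map_append]; rfl]
            rw [List.zip_map, List.map_map]
            apply List.map_congr_left
            intro ab hab
            obtain ⟨ha', hb'⟩ := List.of_mem_zip (a := ab.1) (b := ab.2) (by simpa using hab)
            have ha : 0 ≤ ab.1 := by
              have hm : ab.1 ∈ pvBnds d 0 := by rw [hc]; simpa using ha'
              exact pvBnds_nonneg d 0 ab.1 hm
            have hb : 0 ≤ ab.2 := by
              rcases List.mem_append.1 hb' with hmem | hmem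
              · have hm : ab.2 ∈ pvBnds d 0 := by rw [hc]; simp [hmem]
                exact pvBnds_nonneg d 0 ab.2 hm
              · simp at hmem; omega
            simp only [Function.comp, Prod.map]
            exact hrest ab.1 ab.2 ha hb
          rw [pvChunk, ← ht, ← hd, ← ih, hsegsd, hn]
          simp only [List.map_cons, List.tail_cons, List.cons_append, List.zip_cons_cons,
            List.map_cons]
          rw [hfirst, htail]

lemma alt_eq_map_segs (doc : String) :
    split_function_doc_alt doc = (pvSegs (PySem.Str.splitlines doc)).map pvYieldB := by
  simp [split_function_doc_alt, pvSegs, pvBnds, List.map_map, Function.comp]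

lemma yieldA_eq_yieldB : pvYieldA = pvYieldB := rfl

-- ===== VERDICT (by name: the statement is the Claim_ definition above) =====
theorem split_function_doc_spec : Claim_equal_split_function_doc := by
  intro doc _ _
  show split_function_doc doc = split_function_doc_alt doc
  rw [split_function_doc, alt_eq_map_segs, pvBlocksA_eq_chunk, pvSegs_eq_chunk,
    yieldA_eq_yieldB]
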